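-- pv_equiv track=rewrite | github.com/cafebedouin/structural_dynamics_model | python/institutional_dissent_analysis.py | signature_comparison
-- ===== SOURCE A (Python) =====
-- import math
-- from collections import Counter, defaultdict
--
-- HAS_SCIPY = False
--
-- def signature_comparison(low, high):
--     """Cross-tabulate signature x {low_snare, high_snare}."""
--     low_sigs = Counter(r.get("signature") or "none" for r in low)
--     high_sigs = Counter(r.get("signature") or "none" for r in high)
--
--     all_sigs = sorted(set(low_sigs.keys()) | set(high_sigs.keys()))
--
--     cross_tab = {}
--     for sig in all_sigs:
--         cross_tab[sig] = {
--             "low_snare": low_sigs.get(sig, 0),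
--             "high_snare": high_sigs.get(sig, 0),
--         }
--
--     chi_result = None
--     cramers_v = None
--
--     if HAS_SCIPY and len(all_sigs) >= 2:
--         # Build contingency table: rows = signatures, cols = [low, high]
--         table = []
--         for sig in all_sigs:
--             row = [low_sigs.get(sig, 0), high_sigs.get(sig, 0)]
--             if row[0] + row[1] > 0:
--                 table.append(row)
--
--         if len(table) >= 2:
--             try:
--                 chi2, p, dof, expected = scipy.stats.chi2_contingency(table)
--                 n_total = sum(sum(row) for row in table)
--                 k = min(len(table), len(table[0]))
--                 cramers_v = math.sqrt(chi2 / (n_total * (k - 1))) if n_total > 0 and k > 1 else 0.0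
--                 chi_result = {
--                     "chi2": round(float(chi2), 4),
--                     "p_value": round(float(p), 8),
--                     "dof": int(dof),
--                     "cramers_v": round(cramers_v, 4),
--                 }
--             except Exception as e:
--                 chi_result = {"error": str(e)}
--
--     return {
--         "cross_tab": cross_tab,
--         "chi_squared": chi_result,
--         "cramers_v": round(cramers_v, 4) if cramers_v is not None else None,
--     }
-- ===== SOURCE B (Python) =====
-- def signature_comparison(low, high):
--     """Cross-tabulate signature x {low_snare, high_snare}."""
--     tagged = [((r.get("signature") or "none"), 0) for r in low]
--     tagged += [((r.get("signature") or "none"), 1) for r in high]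
--     tagged.sort(key=lambda t: t[0])
--     cross_tab = {}
--     i, n = 0, len(tagged)
--     while i < n:
--         sig = tagged[i][0]
--         l = h = 0
--         while i < n and tagged[i][0] == sig:
--             if tagged[i][1] == 0:
--                 l += 1
--             else:
--                 h += 1
--             i += 1
--         cross_tab[sig] = {"low_snare": l, "high_snare": h}
--     return {"cross_tab": cross_tab, "chi_squared": None, "cramers_v": None}
-- ===== Notes on version B (the rewrite author's own statement) =====
-- stated objective: alternative
-- what changed: Replaces A's two hash Counters plus keyset-union-then-sort pipeline with sort-then-group: every record is tagged with its group, the combined tagged list is sorted by signature, and one linear scan counts each run of equal signatures, emitting the cross-tab rows in order with no counting dictionary at all.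
import Mathlib
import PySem

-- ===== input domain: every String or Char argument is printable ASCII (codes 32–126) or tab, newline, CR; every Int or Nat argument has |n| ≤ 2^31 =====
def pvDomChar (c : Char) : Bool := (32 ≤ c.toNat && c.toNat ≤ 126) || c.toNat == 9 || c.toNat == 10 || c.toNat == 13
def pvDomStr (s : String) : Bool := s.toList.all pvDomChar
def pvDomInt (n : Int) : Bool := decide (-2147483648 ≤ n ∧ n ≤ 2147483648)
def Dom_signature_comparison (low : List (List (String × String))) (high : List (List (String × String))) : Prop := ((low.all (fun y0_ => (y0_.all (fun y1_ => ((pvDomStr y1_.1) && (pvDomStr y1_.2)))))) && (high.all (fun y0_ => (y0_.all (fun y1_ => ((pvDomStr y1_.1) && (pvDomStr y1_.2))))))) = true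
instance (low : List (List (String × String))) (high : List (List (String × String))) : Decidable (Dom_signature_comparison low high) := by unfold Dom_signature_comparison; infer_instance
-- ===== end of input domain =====

-- B replaces A's two Counters + keyset-union-then-sort pipeline with sort-then-group: it
-- tags every record with its group, sorts the combined tagged list by signature, and scans
-- it once, counting each run of equal signatures (objective: alternative algorithm).
-- The scipy branch of A is dead code (HAS_SCIPY = False) and is ported as such.

-- ===== PORT A =====
-- r.get("signature") or "none": None and "" are the falsy values here
def sigOf (r : List (String × String)) : String :=
  match (PySem.Dict.mk r).get? "signature" with
  | none => "none"
  | some s => if s = "" then "none" else s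

def signature_comparison (low : List (List (String × String))) (high : List (List (String × String))) : List (String × Option (List (String × List (String × Int)))) :=
  let low_sigs := PySem.Dict.counter (low.map sigOf)
  let high_sigs := PySem.Dict.counter (high.map sigOf)
  let all_sigs := PySem.List.sorted (PySem.Set.union (PySem.Set.ofList low_sigs.keys) high_sigs.keys) (fun x => x)
  -- the inner dict literal has two distinct literal keys, so it is its own items list
  let cross_tab := all_sigs.foldl
    (fun d sig => d.insert sig [("low_snare", low_sigs.getD sig 0), ("high_snare", high_sigs.getD sig 0)])
    (PySem.Dict.empty : PySem.Dict String (List (String × Int)))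
  -- HAS_SCIPY is False, so chi_result and cramers_v stay None
  [("cross_tab", some cross_tab.items), ("chi_squared", none), ("cramers_v", none)]

-- ===== PORT B =====
-- the inner while loop: consume the run of entries whose signature equals sig,
-- counting group-0 (low) entries in l and group-1 (high) entries in h
def runLoop (sig : String) (l h : Int) : List (String × Int) → Int × Int × List (String × Int)
  | [] => (l, h, [])
  | t :: rest =>
      if t.1 = sig then
        if t.2 = 0 then runLoop sig (l + 1) h rest
        else runLoop sig l (h + 1) rest
      else (l, h, t :: rest)

-- the remainder the inner loop leaves is never longer than its input (for termination of tabLoop)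
theorem runLoop_rem_le (sig : String) (xs : List (String × Int)) : ∀ (l h : Int), (runLoop sig l h xs).2.2.length ≤ xs.length := by
  induction xs with
  | nil => intro l h; simp [runLoop]
  | cons t rest ih =>
    intro l h
    simp only [runLoop]
    split_ifs with h1 h2
    · exact le_trans (ih _ _) (Nat.le_succ _)
    · exact le_trans (ih _ _) (Nat.le_succ _)
    · simp

-- the outer while loop: take the signature at the front, count its run, record it
def tabLoop (d : PySem.Dict String (List (String × Int))) : List (String × Int) → PySem.Dict String (List (String × Int))
  | [] => d
  | t :: rest =>
      let r := runLoop t.1 0 0 (t :: rest)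
      tabLoop (d.insert t.1 [("low_snare", r.1), ("high_snare", r.2.1)]) r.2.2
termination_by xs => xs.length
decreasing_by
  simp only [runLoop]
  split_ifs <;> exact Nat.lt_succ_of_le (runLoop_rem_le _ _ _ _)

def signature_comparison_alt (low : List (List (String × String))) (high : List (List (String × String))) : List (String × Option (List (String × List (String × Int)))) :=
  let tagged := low.map (fun r => (sigOf r, (0 : Int))) ++ high.map (fun r => (sigOf r, (1 : Int)))
  let sortedT := PySem.List.sorted tagged (fun t => t.1)
  let cross_tab := tabLoop (PySem.Dict.empty : PySem.Dict String (List (String × Int))) sortedT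
  [("cross_tab", some cross_tab.items), ("chi_squared", none), ("cramers_v", none)]

-- ===== PRECONDITION & SPEC =====
def Spec_signature_comparison (low : List (List (String × String))) (high : List (List (String × String))) (out : List (String × Option (List (String × List (String × Int))))) : Prop := out = signature_comparison_alt low high
instance (low : List (List (String × String))) (high : List (List (String × String))) (out : List (String × Option (List (String × List (String × Int))))) : Decidable (Spec_signature_comparison low high out) := by
  unfold Spec_signature_comparison
  letI : DecidableEq (String × List (String × Int)) := inferInstance
  letI : DecidableEq (Option (List (String × List (String × Int)))) := inferInstance
  infer_instance

-- ===== CLAIM (what is proved, stated in full; the proofs are below) =====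
def Claim_equal_signature_comparison : Prop := ∀ (low : List (List (String × String))) (high : List (List (String × String))), Dom_signature_comparison low high → Spec_signature_comparison low high (signature_comparison low high)

-- ===== LEMMAS AND PROOFS =====

-- what one step of the grouping loop records for a key sig, with counts taken over the whole list xs
def tabF (xs : List (String × Int)) (d : PySem.Dict String (List (String × Int))) (sig : String) : PySem.Dict String (List (String × Int)) :=
  d.insert sig [("low_snare", (xs.countP (fun t => t.1 == sig && t.2 == 0) : Int)),
                ("high_snare", (xs.countP (fun t => t.1 == sig && !(t.2 == 0)) : Int))]

theorem runLoop_spec (sig : String) (xs : List (String × Int)) : ∀ (l h : Int),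
    runLoop sig l h xs = (l + ((xs.takeWhile (fun t => t.1 == sig)).countP (fun t => t.2 == 0) : Int),
                          h + ((xs.takeWhile (fun t => t.1 == sig)).countP (fun t => !(t.2 == 0)) : Int),
                          xs.dropWhile (fun t => t.1 == sig)) := by
  induction xs with
  | nil => intro l h; simp [runLoop]
  | cons t rest ih =>
    intro l h
    by_cases hs : t.1 = sig
    · by_cases h0 : t.2 = 0
      · simp [runLoop, hs, h0, ih]
        omega
      · simp [runLoop, hs, h0, ih]
        omega
    · simp [runLoop, hs]

-- in a list sorted by signature where sig is a lower bound, everything past the sig-run differs from sig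
theorem dropWhile_no_sig (sig : String) (xs : List (String × Int))
    (hs : xs.Pairwise (fun a b => a.1 ≤ b.1)) (hmem : ∀ e ∈ xs, sig ≤ e.1) :
    ∀ e ∈ xs.dropWhile (fun t => t.1 == sig), e.1 ≠ sig := by
  induction xs with
  | nil => simp
  | cons t rest ih =>
    by_cases ht : t.1 = sig
    · simp only [List.dropWhile_cons, ht]
      simp only [beq_self_eq_true, if_true]
      exact ih (List.Pairwise.of_cons hs) (fun e he => hmem e (List.mem_cons_of_mem _ he))
    · simp only [List.dropWhile_cons, beq_iff_eq, ht, if_false]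
      intro e he
      rcases List.mem_cons.mp he with rfl | he'
      · exact ht
      · have h1 : sig ≤ t.1 := hmem t (List.mem_cons_self)
        have h2 : t.1 ≤ e.1 := (List.pairwise_cons.mp hs).1 e he'
        have : sig < t.1 := lt_of_le_of_ne h1 (fun hh => ht hh.symm)
        exact fun hh => absurd (hh ▸ (lt_of_lt_of_le this h2)) (lt_irrefl _)

-- Set.add keeps a distinct head in front
theorem foldl_add_head (x : String) (bs : List String) : ∀ (s : List String), x ∉ bs →
    bs.foldl PySem.Set.add (x :: s) = x :: bs.foldl PySem.Set.add s := by
  induction bs with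
  | nil => intro s _; rfl
  | cons b bs ih =>
    intro s hx
    have hbx : ¬(x = b) := fun hh => hx (hh ▸ List.mem_cons_self)
    have hadd : PySem.Set.add (x :: s) b = x :: PySem.Set.add s b := by
      simp only [PySem.Set.add, PySem.Set.contains, List.contains_cons]
      have : (x == b) = false := by simp [hbx]
      simp
      split_ifs <;> simp_all
    rw [List.foldl_cons, hadd, List.foldl_cons,
      ih _ (fun hh => hx (List.mem_cons_of_mem _ hh))]

-- ordered dedup of (all-sig run ++ rest without sig) is sig :: dedup rest
theorem dedup_run_append (sig : String) (as bs : List String)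
    (ha : as ≠ []) (hall : ∀ a ∈ as, a = sig) (hb : sig ∉ bs) :
    PySem.List.dedup (as ++ bs) = sig :: PySem.List.dedup bs := by
  have hofA : ∀ (as' : List String), (∀ a ∈ as', a = sig) → as'.foldl PySem.Set.add [sig] = [sig] := by
    intro as' h
    induction as' with
    | nil => rfl
    | cons a t ih =>
      have : a = sig := h a List.mem_cons_self
      subst this
      have : PySem.Set.add [a] a = [a] := by simp [PySem.Set.add, PySem.Set.contains]
      rw [List.foldl_cons, this]
      exact ih (fun b hb' => h b (List.mem_cons_of_mem _ hb'))
  obtain ⟨a0, as', rfl⟩ : ∃ a0 as', as = a0 :: as' := by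
    cases as with
    | nil => exact absurd rfl ha
    | cons a t => exact ⟨a, t, rfl⟩
  have ha0 : a0 = sig := hall a0 List.mem_cons_self
  subst ha0
  simp only [PySem.List.dedup_eq_ofList, PySem.Set.ofList_eq_foldl]
  rw [List.cons_append, List.foldl_cons]
  have hadd0 : PySem.Set.add ([] : List String) a0 = [a0] := by rfl
  rw [hadd0, List.foldl_append,
    hofA as' (fun b hb' => hall b (List.mem_cons_of_mem _ hb')),
    foldl_add_head a0 bs [] hb]

-- dedup is a sublist (so it inherits sortedness)
theorem foldl_add_sublist : ∀ (xs acc ys : List String), List.Sublist acc ys → List.Sublist (xs.foldl PySem.Set.add acc) (ys ++ xs) := by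
  intro xs
  induction xs with
  | nil => intro acc ys h; simpa using h
  | cons x xs ih =>
    intro acc ys h
    have hstep : List.Sublist (PySem.Set.add acc x) (ys ++ [x]) := by
      simp only [PySem.Set.add]
      split_ifs
      · exact h.trans (List.sublist_append_left _ _)
      · exact h.append (List.Sublist.refl [x])
    have := ih (PySem.Set.add acc x) (ys ++ [x]) hstep
    simpa [List.append_assoc] using this

theorem dedup_sublist (xs : List String) : List.Sublist (PySem.List.dedup xs) xs := by
  simpa using foldl_add_sublist xs [] [] (List.Sublist.refl [])

-- the grouping loop over a list sorted by signature is a fold over its distinct signatures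
theorem tabLoop_eq : ∀ (n : Nat) (xs : List (String × Int)), xs.length ≤ n →
    xs.Pairwise (fun a b => a.1 ≤ b.1) →
    ∀ d, tabLoop d xs = (PySem.List.dedup (xs.map (fun t => t.1))).foldl (tabF xs) d := by
  intro n
  induction n with
  | zero =>
    intro xs hlen _ d
    have : xs = [] := List.length_eq_zero_iff.mp (Nat.le_zero.mp hlen)
    subst this; simp [tabLoop]
  | succ n ih =>
    intro xs hlen hs d
    cases xs with
    | nil => simp [tabLoop]
    | cons t rest =>
      have hmem : ∀ e ∈ t :: rest, t.1 ≤ e.1 := by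
        intro e he
        rcases List.mem_cons.mp he with rfl | he'
        · exact le_refl _
        · exact (List.pairwise_cons.mp hs).1 e he'
      have hBno : ∀ e ∈ (t :: rest).dropWhile (fun u => u.1 == t.1), e.1 ≠ t.1 :=
        dropWhile_no_sig t.1 (t :: rest) hs hmem
      have hAall : ∀ e ∈ (t :: rest).takeWhile (fun u => u.1 == t.1), e.1 = t.1 := by
        intro e he
        have := List.mem_takeWhile_imp he
        exact beq_iff_eq.mp this
      have hAB : t :: rest
          = (t :: rest).takeWhile (fun u => u.1 == t.1) ++ (t :: rest).dropWhile (fun u => u.1 == t.1) :=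
        (List.takeWhile_append_dropWhile).symm
      have hBsub : List.Sublist ((t :: rest).dropWhile (fun u => u.1 == t.1)) (t :: rest) :=
        List.dropWhile_sublist _
      have hBrest : (t :: rest).dropWhile (fun u => u.1 == t.1) = rest.dropWhile (fun u => u.1 == t.1) := by
        simp
      have hBlen : ((t :: rest).dropWhile (fun u => u.1 == t.1)).length ≤ n := by
        rw [hBrest]
        exact le_trans (List.dropWhile_sublist _).length_le (Nat.succ_le_succ_iff.mp hlen)
      have hBpair : ((t :: rest).dropWhile (fun u => u.1 == t.1)).Pairwise (fun a b => a.1 ≤ b.1) :=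
        hs.sublist hBsub
      -- the two run counts are the counts over the whole list
      have hcnt0 : (((t :: rest).takeWhile (fun u => u.1 == t.1)).countP (fun u => u.2 == 0))
          = ((t :: rest).countP (fun u => u.1 == t.1 && u.2 == 0)) := by
        conv_rhs => rw [hAB]
        rw [List.countP_append]
        have hBzero : (((t :: rest).dropWhile (fun u => u.1 == t.1)).countP (fun u => u.1 == t.1 && u.2 == 0)) = 0 := by
          apply List.countP_eq_zero.mpr
          intro e he
          simp [hBno e he]
        rw [hBzero, Nat.add_zero]
        apply List.countP_congr
        intro e he
        simp [hAall e he]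
      have hcnt1 : (((t :: rest).takeWhile (fun u => u.1 == t.1)).countP (fun u => !(u.2 == 0)))
          = ((t :: rest).countP (fun u => u.1 == t.1 && !(u.2 == 0))) := by
        conv_rhs => rw [hAB]
        rw [List.countP_append]
        have hBzero : (((t :: rest).dropWhile (fun u => u.1 == t.1)).countP (fun u => u.1 == t.1 && !(u.2 == 0))) = 0 := by
          apply List.countP_eq_zero.mpr
          intro e he
          simp [hBno e he]
        rw [hBzero, Nat.add_zero]
        apply List.countP_congr
        intro e he
        simp [hAall e he]
      -- the distinct keys split as t.1 :: (keys of the remainder)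
      have hkeys : PySem.List.dedup ((t :: rest).map (fun u => u.1))
          = t.1 :: PySem.List.dedup (((t :: rest).dropWhile (fun u => u.1 == t.1)).map (fun u => u.1)) := by
        conv_lhs => rw [hAB]
        rw [List.map_append]
        apply dedup_run_append
        · have : (t :: rest).takeWhile (fun u => u.1 == t.1) = t :: rest.takeWhile (fun u => u.1 == t.1) := by
            simp
          simp [this]
        · intro a ha
          obtain ⟨e, he, rfl⟩ := List.mem_map.mp ha
          exact hAall e he
        · intro ha
          obtain ⟨e, he, hfst⟩ := List.mem_map.mp ha
          exact hBno e he hfst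
      -- one step of tabLoop, with runLoop_spec
      rw [show tabLoop d (t :: rest)
            = tabLoop (d.insert t.1 [("low_snare", (runLoop t.1 0 0 (t :: rest)).1),
                                     ("high_snare", (runLoop t.1 0 0 (t :: rest)).2.1)])
                ((runLoop t.1 0 0 (t :: rest)).2.2) from by rw [tabLoop]]
      rw [runLoop_spec]
      simp only [zero_add]
      rw [ih _ hBlen hBpair, hkeys, List.foldl_cons]
      have hstep : d.insert t.1
            [("low_snare", (((t :: rest).takeWhile (fun u => u.1 == t.1)).countP (fun u => u.2 == 0) : Int)),
             ("high_snare", (((t :: rest).takeWhile (fun u => u.1 == t.1)).countP (fun u => !(u.2 == 0)) : Int))]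
          = tabF (t :: rest) d t.1 := by
        rw [tabF, hcnt0, hcnt1]
      rw [hstep]
      -- counts over the remainder agree with counts over the whole list for the remainder's keys
      apply PySem.List.foldl_congr_mem
      intro acc sig hsig
      have hsig' : sig ∈ ((t :: rest).dropWhile (fun u => u.1 == t.1)).map (fun u => u.1) :=
        (PySem.List.mem_dedup _ _).mp hsig
      obtain ⟨e0, he0, rfl⟩ := List.mem_map.mp hsig'
      have hne : e0.1 ≠ t.1 := hBno e0 he0
      have htrans : ∀ (p : String × Int → Bool),
          (((t :: rest).dropWhile (fun u => u.1 == t.1)).countP (fun u => u.1 == e0.1 && p u))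
          = ((t :: rest).countP (fun u => u.1 == e0.1 && p u)) := by
        intro p
        conv_rhs => rw [hAB]
        rw [List.countP_append]
        have : (((t :: rest).takeWhile (fun u => u.1 == t.1)).countP (fun u => u.1 == e0.1 && p u)) = 0 := by
          apply List.countP_eq_zero.mpr
          intro e he
          have : e.1 = t.1 := hAall e he
          simp only [this]
          intro hcon
          rw [Bool.and_eq_true] at hcon
          exact absurd (beq_iff_eq.mp hcon.1).symm hne
        rw [this, Nat.zero_add]
      rw [tabF, tabF, htrans (fun u => u.2 == 0), htrans (fun u => !(u.2 == 0))]

-- the run counts over the sorted tagged list are A's two Counter values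
theorem count_low (low high : List (List (String × String))) (sig : String) :
    ((PySem.List.sorted (low.map (fun r => (sigOf r, (0:Int))) ++ high.map (fun r => (sigOf r, (1:Int)))) (fun t => t.1)).countP (fun u => u.1 == sig && u.2 == 0))
    = (low.map sigOf).count sig := by
  rw [List.Perm.countP_eq _ (PySem.List.sorted_perm _ _ _)]
  simp [List.countP_append, List.countP_map, List.count_eq_countP, Function.comp_def]

theorem count_high (low high : List (List (String × String))) (sig : String) :
    ((PySem.List.sorted (low.map (fun r => (sigOf r, (0:Int))) ++ high.map (fun r => (sigOf r, (1:Int)))) (fun t => t.1)).countP (fun u => u.1 == sig && !(u.2 == 0)))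
    = (high.map sigOf).count sig := by
  rw [List.Perm.countP_eq _ (PySem.List.sorted_perm _ _ _)]
  simp [List.countP_append, List.countP_map, List.count_eq_countP, Function.comp_def]

-- the distinct signatures of the sorted tagged list are A's sorted keyset union
theorem keys_eq (low high : List (List (String × String))) :
    PySem.List.dedup ((PySem.List.sorted (low.map (fun r => (sigOf r, (0:Int))) ++ high.map (fun r => (sigOf r, (1:Int)))) (fun t => t.1)).map (fun t => t.1))
    = PySem.List.sorted (PySem.Set.union (PySem.Set.ofList (PySem.Dict.counter (low.map sigOf)).keys) (PySem.Dict.counter (high.map sigOf)).keys) (fun x => x) := by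
  have hperm1 : ((PySem.List.sorted (low.map (fun r => (sigOf r, (0:Int))) ++ high.map (fun r => (sigOf r, (1:Int)))) (fun t => t.1)).map (fun t => t.1)).Perm
      (low.map sigOf ++ high.map sigOf) := by
    have := (PySem.List.sorted_perm (low.map (fun r => (sigOf r, (0:Int))) ++ high.map (fun r => (sigOf r, (1:Int)))) (fun t => t.1) false).map (fun t => t.1)
    simpa [List.map_append, List.map_map, Function.comp_def] using this
  have hnodupR : (PySem.List.sorted (PySem.Set.union (PySem.Set.ofList (PySem.Dict.counter (low.map sigOf)).keys) (PySem.Dict.counter (high.map sigOf)).keys) (fun x => x)).Nodup := by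
    refine ((PySem.List.sorted_perm _ (fun x : String => x) false).symm.nodup ?_)
    rw [PySem.Dict.keys_counter, PySem.Dict.keys_counter, PySem.Set.ofList_ofList]
    exact PySem.Set.nodup_union (PySem.Set.ofList (low.map sigOf)) (PySem.Set.ofList (high.map sigOf)) (PySem.Set.nodup_ofList _)
  have hperm : (PySem.List.dedup ((PySem.List.sorted (low.map (fun r => (sigOf r, (0:Int))) ++ high.map (fun r => (sigOf r, (1:Int)))) (fun t => t.1)).map (fun t => t.1))).Perm
      (PySem.List.sorted (PySem.Set.union (PySem.Set.ofList (PySem.Dict.counter (low.map sigOf)).keys) (PySem.Dict.counter (high.map sigOf)).keys) (fun x => x)) := by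
    apply (List.perm_ext_iff_of_nodup (PySem.List.nodup_dedup _) hnodupR).mpr
    intro a
    rw [PySem.List.mem_dedup, hperm1.mem_iff, PySem.List.mem_sorted,
      PySem.Dict.keys_counter, PySem.Dict.keys_counter, PySem.Set.ofList_ofList,
      PySem.Set.mem_union]
    simp [PySem.Set.mem_ofList]
  exact List.Perm.eq_of_pairwise (fun a b _ _ h1 h2 => le_antisymm h1 h2)
    ((PySem.List.sorted_map_key_pairwise _ _).sublist (dedup_sublist _))
    (PySem.List.sorted_pairwise _ _) hperm

-- ===== VERDICT (by name: the statement is the Claim_ definition above) =====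
theorem signature_comparison_spec : Claim_equal_signature_comparison := by
  intro low high _
  unfold Spec_signature_comparison
  simp only [signature_comparison, signature_comparison_alt]
  rw [tabLoop_eq _ _ le_rfl (PySem.List.sorted_pairwise _ _), keys_eq]
  have hfun : ∀ (acc : PySem.Dict String (List (String × Int))) (sig : String),
      sig ∈ PySem.List.sorted (PySem.Set.union (PySem.Set.ofList (PySem.Dict.counter (low.map sigOf)).keys) (PySem.Dict.counter (high.map sigOf)).keys) (fun x => x) →
      tabF (PySem.List.sorted (low.map (fun r => (sigOf r, (0:Int))) ++ high.map (fun r => (sigOf r, (1:Int)))) (fun t => t.1)) acc sig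
      = acc.insert sig [("low_snare", (PySem.Dict.counter (low.map sigOf)).getD sig 0), ("high_snare", (PySem.Dict.counter (high.map sigOf)).getD sig 0)] := by
    intro acc sig _
    rw [tabF, count_low, count_high, PySem.Dict.getD_counter, PySem.Dict.getD_counter]
  exact congrArg (fun X : PySem.Dict String (List (String × Int)) =>
    [("cross_tab", some X.items), ("chi_squared", none), ("cramers_v", none)])
    (PySem.List.foldl_congr_mem _ _ _ _ hfun).symm
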